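-- pv_equiv track=rewrite | github.com/robert00091/Cheng-Yuan | Algorithm/Computation in Data Science/final.py | is_cluster
-- ===== SOURCE A (Python) =====
-- def is_cluster(s_i, s_j, groups):
--     indices = {}
--     for i, group in enumerate(groups):
--         for num in group:
--             indices.setdefault(num, set()).add(i)
--
--     if indices.get(s_i, set()) & indices.get(s_j, set()) == {0}:
--         return 1
--     else:
--         return 0
-- ===== SOURCE B (Python) =====
-- def is_cluster(s_i, s_j, groups):
--     # Single pass: collect the indices of the groups containing both items,
--     # no inverted index of all elements.
--     common = set()
--     for i, group in enumerate(groups):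
--         if s_i in group and s_j in group:
--             common.add(i)
--     return 1 if common == {0} else 0
-- ===== Notes on version B (the rewrite author's own statement) =====
-- stated objective: faster
-- what changed: B drops the full inverted index (element -> set of group indices) and instead does one pass over enumerate(groups) collecting only the indices of groups containing both s_i and s_j, then compares that set to {0}.
import Mathlib
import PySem

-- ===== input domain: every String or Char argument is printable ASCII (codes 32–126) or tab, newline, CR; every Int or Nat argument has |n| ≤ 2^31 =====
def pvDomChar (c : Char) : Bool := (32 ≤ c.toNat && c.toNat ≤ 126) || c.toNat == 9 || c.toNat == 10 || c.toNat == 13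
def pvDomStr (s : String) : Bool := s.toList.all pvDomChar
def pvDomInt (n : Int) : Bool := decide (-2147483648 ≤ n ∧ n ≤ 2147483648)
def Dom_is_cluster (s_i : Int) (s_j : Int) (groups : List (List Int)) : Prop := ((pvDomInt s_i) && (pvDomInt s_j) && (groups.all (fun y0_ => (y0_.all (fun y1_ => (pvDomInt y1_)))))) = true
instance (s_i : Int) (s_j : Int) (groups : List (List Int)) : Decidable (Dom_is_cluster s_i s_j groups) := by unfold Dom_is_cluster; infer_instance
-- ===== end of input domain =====

-- B replaces A's full inverted index by a single pass collecting only the group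
-- indices containing both items (objective: faster by a constant factor / less memory).

-- ===== PORT A =====
def is_cluster (s_i : Int) (s_j : Int) (groups : List (List Int)) : Int :=
  let indices : PySem.Dict Int (List Int) :=
    (PySem.List.enumerate groups 0).foldl
      (fun d p => p.2.foldl (fun d num => d.modify num [] (fun s => PySem.Set.add s p.1)) d)
      PySem.Dict.empty
  if PySem.Set.equal (PySem.Set.inter (indices.getD s_i []) (indices.getD s_j [])) [0] then 1 else 0

-- ===== PORT B =====
def is_cluster_alt (s_i : Int) (s_j : Int) (groups : List (List Int)) : Int :=
  let common : PySem.Set Int :=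
    (PySem.List.enumerate groups 0).foldl
      (fun c p => if s_i ∈ p.2 ∧ s_j ∈ p.2 then PySem.Set.add c p.1 else c) []
  if PySem.Set.equal common [0] then 1 else 0

-- ===== PRECONDITION & SPEC =====
def Spec_is_cluster (s_i : Int) (s_j : Int) (groups : List (List Int)) (out : Int) : Prop := out = is_cluster_alt s_i s_j groups
instance (s_i : Int) (s_j : Int) (groups : List (List Int)) (out : Int) : Decidable (Spec_is_cluster s_i s_j groups out) := by unfold Spec_is_cluster; infer_instance

-- ===== CLAIM (what is proved, stated in full; the proofs are below) =====
def Claim_equal_is_cluster : Prop := ∀ (s_i : Int) (s_j : Int) (groups : List (List Int)), Dom_is_cluster s_i s_j groups → Spec_is_cluster s_i s_j groups (is_cluster s_i s_j groups)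

-- ===== LEMMAS AND PROOFS =====

-- one group's inner update loop of A's dict build
theorem getD_innerFold (g : List Int) (i : Int) (d : PySem.Dict Int (List Int)) (v x : Int) :
    x ∈ (g.foldl (fun d num => d.modify num [] (fun s => PySem.Set.add s i)) d).getD v []
      ↔ x ∈ d.getD v [] ∨ (v ∈ g ∧ x = i) := by
  induction g generalizing d with
  | nil => simp
  | cons a g ih =>
    simp only [List.foldl_cons, ih, PySem.Dict.getD_modify, List.mem_cons]
    by_cases h : v = a
    · simp [h, PySem.Set.mem_add]; try tauto
    · simp [h]; try tauto

-- A's whole dict build, characterised by membership of one looked-up entry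
theorem getD_outerFold (l : List (Int × List Int)) (d : PySem.Dict Int (List Int)) (v x : Int) :
    x ∈ (l.foldl (fun d p => p.2.foldl (fun d num => d.modify num [] (fun s => PySem.Set.add s p.1)) d) d).getD v []
      ↔ x ∈ d.getD v [] ∨ ∃ p ∈ l, v ∈ p.2 ∧ x = p.1 := by
  induction l generalizing d with
  | nil => simp
  | cons a l ih =>
    simp only [List.foldl_cons, ih, getD_innerFold, List.mem_cons]
    constructor
    · rintro ((h | ⟨hv, hx⟩) | ⟨p, hp, hv, hx⟩)
      exacts [Or.inl h, Or.inr ⟨a, Or.inl rfl, hv, hx⟩, Or.inr ⟨p, Or.inr hp, hv, hx⟩]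
    · rintro (h | ⟨p, rfl | hp, hv, hx⟩)
      exacts [Or.inl (Or.inl h), Or.inl (Or.inr ⟨hv, hx⟩), Or.inr ⟨p, hp, hv, hx⟩]

-- B's collecting loop, characterised by membership
theorem mem_commonFold (l : List (Int × List Int)) (s_i s_j : Int) (c : PySem.Set Int) (x : Int) :
    x ∈ l.foldl (fun c p => if s_i ∈ p.2 ∧ s_j ∈ p.2 then PySem.Set.add c p.1 else c) c
      ↔ x ∈ c ∨ ∃ p ∈ l, (s_i ∈ p.2 ∧ s_j ∈ p.2) ∧ x = p.1 := by
  induction l generalizing c with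
  | nil => simp
  | cons a l ih =>
    simp only [List.foldl_cons, ih, List.mem_cons]
    by_cases h : s_i ∈ a.2 ∧ s_j ∈ a.2
    · simp [h, PySem.Set.mem_add]; try tauto
    · simp [h]; try tauto

-- indices in enumerate are at least the start
theorem enumerate_fst_ge (l : List (List Int)) (s : Int) (p : Int × List Int)
    (hp : p ∈ PySem.List.enumerate l s) : s ≤ p.1 := by
  induction l generalizing s with
  | nil => simp [PySem.List.enumerate_nil] at hp
  | cons a l ih =>
    rw [PySem.List.enumerate_cons, List.mem_cons] at hp
    rcases hp with h | h
    · simp [h]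
    · have := ih (s + 1) h
      omega

-- the group at a given index is unique
theorem enumerate_functional (l : List (List Int)) (s : Int) (p q : Int × List Int)
    (hp : p ∈ PySem.List.enumerate l s) (hq : q ∈ PySem.List.enumerate l s)
    (h : p.1 = q.1) : p = q := by
  induction l generalizing s with
  | nil => simp [PySem.List.enumerate_nil] at hp
  | cons a l ih =>
    rw [PySem.List.enumerate_cons, List.mem_cons] at hp hq
    rcases hp with hp | hp <;> rcases hq with hq | hq
    · rw [hp, hq]
    · have := enumerate_fst_ge l (s + 1) q hq
      rw [hp] at h; omega
    · have := enumerate_fst_ge l (s + 1) p hp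
      rw [hq] at h; omega
    · exact ih (s + 1) hp hq

-- ===== VERDICT (by name: the statement is the Claim_ definition above) =====
theorem is_cluster_spec : Claim_equal_is_cluster := by
  intro s_i s_j groups _
  unfold Spec_is_cluster is_cluster is_cluster_alt
  have hmem : ∀ x : Int,
      x ∈ PySem.Set.inter
        (((PySem.List.enumerate groups 0).foldl
            (fun d p => p.2.foldl (fun d num => d.modify num [] (fun s => PySem.Set.add s p.1)) d)
            PySem.Dict.empty).getD s_i [])
        (((PySem.List.enumerate groups 0).foldl
            (fun d p => p.2.foldl (fun d num => d.modify num [] (fun s => PySem.Set.add s p.1)) d)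
            PySem.Dict.empty).getD s_j [])
      ↔ x ∈ (PySem.List.enumerate groups 0).foldl
            (fun c p => if s_i ∈ p.2 ∧ s_j ∈ p.2 then PySem.Set.add c p.1 else c) [] := by
    intro x
    rw [PySem.Set.mem_inter, getD_outerFold, getD_outerFold, mem_commonFold]
    simp only [PySem.Dict.getD_empty, List.not_mem_nil, false_or]
    constructor
    · rintro ⟨⟨p, hp, hvp, hxp⟩, ⟨q, hq, hvq, hxq⟩⟩
      have : p = q := enumerate_functional groups 0 p q hp hq (by rw [← hxp, ← hxq])
      subst this
      exact ⟨p, hp, ⟨hvp, hvq⟩, hxp⟩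
    · rintro ⟨p, hp, ⟨h1, h2⟩, hx⟩
      exact ⟨⟨p, hp, h1, hx⟩, ⟨p, hp, h2, hx⟩⟩
  have heq : PySem.Set.equal
      (PySem.Set.inter
        (((PySem.List.enumerate groups 0).foldl
            (fun d p => p.2.foldl (fun d num => d.modify num [] (fun s => PySem.Set.add s p.1)) d)
            PySem.Dict.empty).getD s_i [])
        (((PySem.List.enumerate groups 0).foldl
            (fun d p => p.2.foldl (fun d num => d.modify num [] (fun s => PySem.Set.add s p.1)) d)
            PySem.Dict.empty).getD s_j [])) [0]
      = PySem.Set.equal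
          ((PySem.List.enumerate groups 0).foldl
            (fun c p => if s_i ∈ p.2 ∧ s_j ∈ p.2 then PySem.Set.add c p.1 else c) []) [0] := by
    rw [Bool.eq_iff_iff, PySem.Set.equal_iff, PySem.Set.equal_iff]
    exact forall_congr' (fun x => iff_congr (hmem x) Iff.rfl)
  simp only [heq]
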